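-- pv_equiv track=rewrite | github.com/Chewbaccademy/ClusTric | src/triclustering/preprocessing/als_preprocess.py | compute_consecutive_snapshots_n
-- ===== SOURCE A (Python) =====
-- def compute_consecutive_snapshots_n(data:dict, n:int, label:str, yes_label:str='Y') -> dict:
--     """Build snapshots of n timepoints
--
--     -------
--     parameters:
--     - data: is a dict with ALS data with the format returned by `df_to_dict`
--     - n: is the number of consecutive snapshots to consider, ie. the size of snapshots set. the size of snapshots set could be defined
--     - label: is the target problem
--     - yes_label: symbole used as a positive target
--     - strategy (NOT IMPLENTED ):
--         - `flexible` (default) - sets of snapshots have a maximum size `n`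
--         - `strict` - sets of snapshots have a strict size of `n`
--
--     ------
--     output dict format:
--     ```
--     {
--         1: [ # patient_id
--             (0, 'Y'), # snapshot_id and target value of the snapshot
--             (1, 'Y'),
--             ...
--         ]
--         ...
--     }
--     ```
--     """
--
--     # filters out patient with too few appointments (number of appointments < n)
--     #? final is not used ??
--     final = dict()
--     for (p, t) in data.items(): # loop through patients
--         if len(t.keys()) >= n:
--             fd = dict()
--             for (key, val) in t.items(): # loop through timepoints of the patient
--                 fd[key] = val
--                 final[p] = fd #? I think this is one tab too far
--
--     # build snapshots
--     snaps = dict()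
--     for (p, ts) in data.items(): # loop through patients
--         for t in ts.keys(): # loop through timepoints of the patient
--
--             size_t = len(ts.keys())
--             size_n = n
--             if t < size_t - (size_n-1) and all(map(lambda c: c != yes_label, [data[p][t+y][label] for y in range(0, size_n-1)])):
--                 if p not in snaps:
--                     snaps[p] = list()
--                 snaps[p].append([(t+j, data[p][t+j][label])
--                                 for j in range(0, size_n)])
--     return snaps
-- ===== SOURCE B (Python) =====
-- def compute_consecutive_snapshots_n(data: dict, n: int, label: str, yes_label: str = 'Y') -> dict:
--     """Different algorithm: per patient, sort the positively-labelled timepoints once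
--     and decide each window by a binary search (hand-written bisect_left, since this
--     module imports nothing): the window starting at t is clean iff the first positive
--     timepoint >= t lies at or beyond t + n - 1.  A's dead `final` block is dropped and
--     each patient's snapshot list is built whole and inserted once if non-empty."""
--     snaps = {}
--     for p, ts in data.items():
--         bound = len(ts) - (n - 1)
--         pos = sorted(t for t, row in ts.items() if row.get(label) == yes_label)
--         pat = [[(t + j, ts[t + j][label]) for j in range(n)]
--                for t in ts
--                if t < bound and _window_clear(pos, t, n)]
--         if pat:
--             snaps[p] = pat
--     return snaps
--
--
-- def _window_clear(pos, t, n):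
--     i = _lower_bound(pos, t)
--     return i == len(pos) or pos[i] >= t + n - 1
--
--
-- def _lower_bound(a, x):
--     # bisect.bisect_left, written out because this module may not import
--     lo, hi = 0, len(a)
--     while lo < hi:
--         mid = (lo + hi) // 2
--         if a[mid] < x:
--             lo = mid + 1
--         else:
--             hi = mid
--     return lo
-- ===== Notes on version B (the rewrite author's own statement) =====
-- stated objective: alternative
-- what changed: Instead of A's per-start rescan of the next n-1 rows (all/map over freshly built value lists, re-resolving data[p] on every access), B sorts each patient's positively-labelled timepoints once and decides every window with a binary search (hand-written bisect_left): the window at t is clean iff the first positive timepoint >= t is >= t+n-1; A's dead `final` block is dropped and each patient's snapshot list is built whole and inserted once.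
import Mathlib
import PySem

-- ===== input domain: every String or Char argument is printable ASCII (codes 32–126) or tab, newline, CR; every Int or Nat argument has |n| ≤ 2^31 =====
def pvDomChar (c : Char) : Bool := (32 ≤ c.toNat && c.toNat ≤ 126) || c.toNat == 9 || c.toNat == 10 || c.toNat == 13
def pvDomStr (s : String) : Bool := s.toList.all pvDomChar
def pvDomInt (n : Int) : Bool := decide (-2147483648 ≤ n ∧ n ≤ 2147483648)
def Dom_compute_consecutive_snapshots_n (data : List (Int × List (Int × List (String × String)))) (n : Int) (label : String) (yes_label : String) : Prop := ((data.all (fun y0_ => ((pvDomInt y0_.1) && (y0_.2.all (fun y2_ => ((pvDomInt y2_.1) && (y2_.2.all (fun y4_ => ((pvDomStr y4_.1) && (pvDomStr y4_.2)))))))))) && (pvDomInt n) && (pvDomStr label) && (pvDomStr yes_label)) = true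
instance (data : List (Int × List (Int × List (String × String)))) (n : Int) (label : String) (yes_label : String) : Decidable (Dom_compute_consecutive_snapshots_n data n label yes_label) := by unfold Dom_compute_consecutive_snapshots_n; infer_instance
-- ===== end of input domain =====

-- B replaces A's per-window value rescan by sorting each patient's positive timepoints once and
-- binary-searching for the first positive ≥ t (window clean iff it is ≥ t+n-1); equal RETURN value on Pre_.

-- ===== PORT A =====
-- data[p][t][label] with every missing key defaulted (Python raises there; Pre_ excludes those inputs)
def pvAVal (data : List (Int × List (Int × List (String × String)))) (p t : Int) (label : String) : String :=
  (PySem.Dict.mk ((PySem.Dict.mk ((PySem.Dict.mk data).getD p [])).getD t [])).getD label ""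

def compute_consecutive_snapshots_n (data : List (Int × List (Int × List (String × String)))) (n : Int) (label : String) (yes_label : String) : List (Int × List (List (Int × String))) :=
  -- A's unused `final` block, ported verbatim
  let _final : PySem.Dict Int (PySem.Dict Int (List (String × String))) :=
    data.foldl (fun final pt =>
      if n ≤ ((PySem.Dict.mk pt.2).keys.length : Int) then
        ((PySem.Dict.mk pt.2).items.foldl
          (fun (st : PySem.Dict Int (List (String × String)) × PySem.Dict Int (PySem.Dict Int (List (String × String)))) kv =>
            let fd := st.1.insert kv.1 kv.2
            (fd, st.2.insert pt.1 fd))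
          (PySem.Dict.empty, final)).2
      else final) PySem.Dict.empty
  -- build snapshots
  let snaps : PySem.Dict Int (List (List (Int × String))) :=
    data.foldl (fun snaps pts =>
      (PySem.Dict.mk pts.2).keys.foldl (fun snaps t =>
        let size_t : Int := ((PySem.Dict.mk pts.2).keys.length : Int)
        let size_n : Int := n
        if decide (t < size_t - (size_n - 1)) &&
            ((PySem.List.pyRange 0 (size_n - 1) 1).map (fun y => pvAVal data pts.1 (t + y) label)).all
              (fun c => c != yes_label) then
          let snaps := if snaps.contains pts.1 then snaps else snaps.insert pts.1 []
          snaps.modify pts.1 []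
            (fun l => l ++ [(PySem.List.pyRange 0 size_n 1).map (fun j => (t + j, pvAVal data pts.1 (t + j) label))])
        else snaps) snaps) PySem.Dict.empty
  snaps.items

-- ===== PORT B =====
-- Source B's hand-written _lower_bound is bisect.bisect_left, loop for loop
-- (lo,hi,mid = (lo+hi)//2 on non-negative ints: Python // = Nat /): ported as the prelude's bisectLeft.
def pvLowerBound (a : List Int) (x : Int) : Nat := PySem.List.bisectLeft a x

-- Source B's _window_clear; pos[i] is only read when i < len(pos) (the `or` short-circuits), so getD is exact
def pvWindowClear (pos : List Int) (t n : Int) : Bool :=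
  let i := pvLowerBound pos t
  decide (i = pos.length) || decide (t + n - 1 ≤ pos.getD i 0)

def compute_consecutive_snapshots_n_alt (data : List (Int × List (Int × List (String × String)))) (n : Int) (label : String) (yes_label : String) : List (Int × List (List (Int × String))) :=
  (data.foldl (fun snaps pts =>
      let ts := pts.2
      let bound : Int := (ts.length : Int) - (n - 1)
      let pos : List Int :=
        PySem.List.sorted (((PySem.Dict.mk ts).items.filter
          (fun kv => (PySem.Dict.mk kv.2).get? label == some yes_label)).map (·.1)) (fun x => x)
      let pat : List (List (Int × String)) :=
        ((PySem.Dict.mk ts).keys.filter (fun t =>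
            decide (t < bound) && pvWindowClear pos t n)).map
          (fun t => (PySem.List.pyRange 0 n 1).map
            (fun j => (t + j, (PySem.Dict.mk ((PySem.Dict.mk ts).getD (t + j) [])).getD label "")))
      if pat.isEmpty then snaps else snaps.insert pts.1 pat)
    (PySem.Dict.empty : PySem.Dict Int (List (List (Int × String))))).items

-- ===== PRECONDITION & SPEC =====
-- the label value recorded for timepoint t of a patient's dict ts (none = Python KeyError)
def pvLab (ts : List (Int × List (String × String))) (label : String) (t : Int) : Option String :=
  ((PySem.Dict.mk ts).get? t).bind (fun row => (PySem.Dict.mk row).get? label)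

-- Pre_ excludes association lists with duplicate patient/timepoint keys, on which the Python dict's
-- key collapse is not what the assoc-list ports compute, and inputs where A raises KeyError: it requires
-- distinct keys and, for every timepoint t below the window bound, every key/label access A performs exists.
def Pre_compute_consecutive_snapshots_n (data : List (Int × List (Int × List (String × String)))) (n : Int) (label : String) (yes_label : String) : Prop :=
  (data.map (·.1)).Nodup ∧
  ∀ pts ∈ data,
    (pts.2.map (·.1)).Nodup ∧
    ∀ t ∈ pts.2.map (·.1),
      t < (pts.2.length : Int) - (n - 1) →
        (∀ y ∈ PySem.List.pyRange 0 (n - 1) 1, (pvLab pts.2 label (t + y)).isSome) ∧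
        ((∀ y ∈ PySem.List.pyRange 0 (n - 1) 1, pvLab pts.2 label (t + y) ≠ some yes_label) →
          (pvLab pts.2 label (t + (n - 1))).isSome)
instance (data : List (Int × List (Int × List (String × String)))) (n : Int) (label : String) (yes_label : String) : Decidable (Pre_compute_consecutive_snapshots_n data n label yes_label) := by unfold Pre_compute_consecutive_snapshots_n; infer_instance

def pvWitness_compute_consecutive_snapshots_n : (List (Int × List (Int × List (String × String)))) × Int × String × String :=
  ([(1, [(0, [("f", "N")]), (1, [("f", "Y")])])], 2, "f", "Y")

def Spec_compute_consecutive_snapshots_n (data : List (Int × List (Int × List (String × String)))) (n : Int) (label : String) (yes_label : String) (out : List (Int × List (List (Int × String)))) : Prop := out = compute_consecutive_snapshots_n_alt data n label yes_label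
instance (data : List (Int × List (Int × List (String × String)))) (n : Int) (label : String) (yes_label : String) (out : List (Int × List (List (Int × String)))) : Decidable (Spec_compute_consecutive_snapshots_n data n label yes_label out) := by unfold Spec_compute_consecutive_snapshots_n; infer_instance

-- ===== CLAIM (what is proved, stated in full; the proofs are below) =====
def Claim_equal_compute_consecutive_snapshots_n : Prop := ∀ (data : List (Int × List (Int × List (String × String)))) (n : Int) (label : String) (yes_label : String), Dom_compute_consecutive_snapshots_n data n label yes_label → Pre_compute_consecutive_snapshots_n data n label yes_label → Spec_compute_consecutive_snapshots_n data n label yes_label (compute_consecutive_snapshots_n data n label yes_label)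

-- ===== LEMMAS AND PROOFS =====

theorem pv_witness_ok :
    Dom_compute_consecutive_snapshots_n (pvWitness_compute_consecutive_snapshots_n.1) (pvWitness_compute_consecutive_snapshots_n.2.1) (pvWitness_compute_consecutive_snapshots_n.2.2.1) (pvWitness_compute_consecutive_snapshots_n.2.2.2) ∧
    Pre_compute_consecutive_snapshots_n (pvWitness_compute_consecutive_snapshots_n.1) (pvWitness_compute_consecutive_snapshots_n.2.1) (pvWitness_compute_consecutive_snapshots_n.2.2.1) (pvWitness_compute_consecutive_snapshots_n.2.2.2) := by
  constructor <;> decide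

-- proof-only abbreviations for the two fold bodies
def pvCondA (data : List (Int × List (Int × List (String × String)))) (pts : Int × List (Int × List (String × String))) (n : Int) (label yes_label : String) (t : Int) : Bool :=
  decide (t < ((PySem.Dict.mk pts.2).keys.length : Int) - (n - 1)) &&
  ((PySem.List.pyRange 0 (n - 1) 1).map (fun y => pvAVal data pts.1 (t + y) label)).all (fun c => c != yes_label)

def pvWinA (data : List (Int × List (Int × List (String × String)))) (p n : Int) (label : String) (t : Int) : List (Int × String) :=
  (PySem.List.pyRange 0 n 1).map (fun j => (t + j, pvAVal data p (t + j) label))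

def pvStepA (data : List (Int × List (Int × List (String × String)))) (n : Int) (label yes_label : String) (snaps : PySem.Dict Int (List (List (Int × String)))) (pts : Int × List (Int × List (String × String))) : PySem.Dict Int (List (List (Int × String))) :=
  (PySem.Dict.mk pts.2).keys.foldl (fun snaps t =>
    if pvCondA data pts n label yes_label t then
      (if snaps.contains pts.1 then snaps else snaps.insert pts.1 []).modify pts.1 []
        (fun l => l ++ [pvWinA data pts.1 n label t])
    else snaps) snaps

-- the raw (unsorted) list of positively-labelled timepoints of a patient
def pvPosRaw (label yes_label : String) (ts : List (Int × List (String × String))) : List Int :=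
  ((PySem.Dict.mk ts).items.filter (fun kv => (PySem.Dict.mk kv.2).get? label == some yes_label)).map (·.1)

def pvPosB (label yes_label : String) (ts : List (Int × List (String × String))) : List Int :=
  PySem.List.sorted (pvPosRaw label yes_label ts) (fun x => x)

def pvCondB (n : Int) (label yes_label : String) (pts : Int × List (Int × List (String × String))) (t : Int) : Bool :=
  decide (t < (pts.2.length : Int) - (n - 1)) && pvWindowClear (pvPosB label yes_label pts.2) t n

def pvWinB (n : Int) (label : String) (pts : Int × List (Int × List (String × String))) (t : Int) : List (Int × String) :=
  (PySem.List.pyRange 0 n 1).map (fun j => (t + j, (PySem.Dict.mk ((PySem.Dict.mk pts.2).getD (t + j) [])).getD label ""))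

def pvPatB (n : Int) (label yes_label : String) (pts : Int × List (Int × List (String × String))) : List (List (Int × String)) :=
  ((PySem.Dict.mk pts.2).keys.filter (pvCondB n label yes_label pts)).map (pvWinB n label pts)

def pvStepB (n : Int) (label yes_label : String) (snaps : PySem.Dict Int (List (List (Int × String)))) (pts : Int × List (Int × List (String × String))) : PySem.Dict Int (List (List (Int × String))) :=
  if (pvPatB n label yes_label pts).isEmpty then snaps else snaps.insert pts.1 (pvPatB n label yes_label pts)

theorem pv_getD_some {kap nu : Type} [BEq kap] (d : PySem.Dict kap nu) (k : kap) (v : nu) (d0 : nu)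
    (h : d.get? k = some v) : d.getD k d0 = v := by
  rw [PySem.Dict.getD_eq_get?_getD, h]; rfl

theorem pv_modify_insert {nu : Type} (s : PySem.Dict Int nu) (p : Int) (acc d0 : nu) (f : nu → nu) :
    (s.insert p acc).modify p d0 f = s.insert p (f acc) := by
  unfold PySem.Dict.modify
  rw [PySem.Dict.getD_insert_self, PySem.Dict.insert_insert_self]

-- the appending loop with p already inserted
theorem pv_foldA_present (data : List (Int × List (Int × List (String × String)))) (n : Int)
    (label : String) (p : Int)
    (l : List Int) (s : PySem.Dict Int (List (List (Int × String)))) (acc : List (List (Int × String))) :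
    l.foldl (fun snaps t =>
        (if snaps.contains p then snaps else snaps.insert p []).modify p []
          (fun l => l ++ [pvWinA data p n label t])) (s.insert p acc)
      = s.insert p (acc ++ l.map (pvWinA data p n label)) := by
  induction l generalizing acc with
  | nil => simp
  | cons t tl ih =>
    have hc : (s.insert p acc).contains p = true := PySem.Dict.contains_insert_self s p acc
    simp only [List.foldl_cons, hc, if_true]
    rw [pv_modify_insert, ih (acc ++ [pvWinA data p n label t])]
    simp

theorem pv_foldA_fresh (data : List (Int × List (Int × List (String × String)))) (n : Int)
    (label : String) (p : Int)
    (l : List Int) (s : PySem.Dict Int (List (List (Int × String))))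
    (hs : s.contains p = false) :
    l.foldl (fun snaps t =>
        (if snaps.contains p then snaps else snaps.insert p []).modify p []
          (fun l => l ++ [pvWinA data p n label t])) s
      = if l.isEmpty then s else s.insert p (l.map (pvWinA data p n label)) := by
  cases l with
  | nil => simp
  | cons t tl =>
    simp only [List.foldl_cons, hs, Bool.false_eq_true, if_false, List.isEmpty_cons]
    rw [pv_modify_insert, pv_foldA_present]
    simp

-- membership in the positive list names exactly the yes-labelled timepoints
theorem pv_mem_posRaw (label yes_label : String) (ts : List (Int × List (String × String)))
    (htnd : (ts.map (·.1)).Nodup) (q : Int) :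
    q ∈ pvPosRaw label yes_label ts ↔ pvLab ts label q = some yes_label := by
  unfold pvPosRaw pvLab
  constructor
  · intro h
    obtain ⟨kv, hkv, hfst⟩ := List.mem_map.mp h
    have hkv2 := List.mem_filter.mp hkv
    have hget : (PySem.Dict.mk ts).get? q = some kv.2 := by
      have hqkv : (q, kv.2) ∈ ts := by
        have : kv = (q, kv.2) := by cases kv; simp at hfst ⊢; exact hfst
        rw [← this]; exact hkv2.1
      exact PySem.Dict.get?_of_mem_items (PySem.Dict.mk ts) hqkv (by simpa [PySem.Dict.keys] using htnd)
    rw [hget]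
    simpa using hkv2.2
  · intro h
    cases hrow : (PySem.Dict.mk ts).get? q with
    | none => rw [hrow] at h; simp at h
    | some row =>
      rw [hrow] at h
      have hlab : (PySem.Dict.mk row).get? label = some yes_label := h
      have hrowmem : (q, row) ∈ ts := PySem.Dict.mem_items_of_get?_eq_some (PySem.Dict.mk ts) hrow
      exact List.mem_map.mpr ⟨(q, row), List.mem_filter.mpr ⟨hrowmem, by simp [hlab]⟩, rfl⟩

-- the bisect guard says: no positive timepoint lies in [t, t+n-2]
theorem pv_windowClear_iff (pos : List Int) (t n : Int) (hpw : pos.Pairwise (· ≤ ·)) :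
    pvWindowClear pos t n = true ↔ ∀ q ∈ pos, ¬ (t ≤ q ∧ q < t + n - 1) := by
  obtain ⟨hle, hlt, hge⟩ := PySem.List.bisectLeft_spec pos t hpw
  unfold pvWindowClear pvLowerBound
  simp only [Bool.or_eq_true, decide_eq_true_eq]
  constructor
  · rintro (hlen | hgd) q hq ⟨hq1, hq2⟩
    · obtain ⟨j, hj, rfl⟩ := List.mem_iff_getElem.mp hq
      have := hlt j hj (by omega)
      omega
    · obtain ⟨j, hj, rfl⟩ := List.mem_iff_getElem.mp hq
      by_cases hji : j < PySem.List.bisectLeft pos t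
      · have := hlt j hj hji; omega
      · have hij : PySem.List.bisectLeft pos t ≤ j := by omega
        have hilen : PySem.List.bisectLeft pos t < pos.length := by omega
        rw [List.getD_eq_getElem pos 0 hilen] at hgd
        have hmono : pos[PySem.List.bisectLeft pos t] ≤ pos[j] := by
          rcases Nat.lt_or_ge (PySem.List.bisectLeft pos t) j with hlt' | hge'
          · exact List.pairwise_iff_getElem.mp hpw _ _ hilen hj hlt'
          · have : PySem.List.bisectLeft pos t = j := by omega
            simp [this]
        omega
  · intro h
    by_cases hlen : PySem.List.bisectLeft pos t = pos.length
    · exact Or.inl hlen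
    · right
      have hilen : PySem.List.bisectLeft pos t < pos.length := by omega
      rw [List.getD_eq_getElem pos 0 hilen]
      have hmem : pos[PySem.List.bisectLeft pos t] ∈ pos := List.getElem_mem hilen
      have ht : t ≤ pos[PySem.List.bisectLeft pos t] := hge _ hilen (Nat.le_refl _)
      have := h _ hmem
      omega

-- A's per-window guard equals B's sorted-positives bisect guard (under Pre_'s access clause)
theorem pv_cond_eq (data : List (Int × List (Int × List (String × String)))) (n : Int)
    (label yes_label : String) (pts : Int × List (Int × List (String × String)))
    (hdnd : (data.map (·.1)).Nodup) (hmem : pts ∈ data)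
    (htnd : (pts.2.map (·.1)).Nodup)
    (hpre : ∀ t ∈ pts.2.map (·.1),
      t < (pts.2.length : Int) - (n - 1) →
        (∀ y ∈ PySem.List.pyRange 0 (n - 1) 1, (pvLab pts.2 label (t + y)).isSome))
    (t : Int) (ht : t ∈ pts.2.map (·.1)) :
    pvCondA data pts n label yes_label t = pvCondB n label yes_label pts t := by
  have hlen : ((PySem.Dict.mk pts.2).keys.length : Int) = (pts.2.length : Int) := by
    simp [PySem.Dict.keys]
  unfold pvCondA pvCondB
  rw [hlen]
  by_cases hb : t < (pts.2.length : Int) - (n - 1)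
  · simp only [hb, decide_true, Bool.true_and]
    have hdata : (PySem.Dict.mk data).getD pts.1 [] = pts.2 :=
      PySem.Dict.getD_of_mem_items (PySem.Dict.mk data) hmem (by simpa [PySem.Dict.keys] using hdnd) []
    have hpw : (pvPosB label yes_label pts.2).Pairwise (· ≤ ·) :=
      PySem.List.sorted_pairwise (pvPosRaw label yes_label pts.2) (fun x => x)
    apply Bool.eq_iff_iff.mpr
    rw [pv_windowClear_iff _ t n hpw]
    simp only [List.all_eq_true, List.mem_map, bne_iff_ne, ne_eq,
      forall_exists_index, and_imp, forall_apply_eq_imp_iff₂]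
    constructor
    · -- A's guard true → no positive in the window
      intro h q hq ⟨hq1, hq2⟩
      have hqraw : q ∈ pvPosRaw label yes_label pts.2 := by
        unfold pvPosB at hq
        exact (PySem.List.mem_sorted _ _ _ q).mp hq
      have hqlab := (pv_mem_posRaw label yes_label pts.2 htnd q).mp hqraw
      have hy : (q - t) ∈ PySem.List.pyRange 0 (n - 1) 1 :=
        (PySem.List.mem_pyRange_one).mpr (by omega)
      have := h (q - t) hy
      have hqt : t + (q - t) = q := by omega
      rw [hqt] at this
      -- the accessed value is yes_label, contradicting A's guard
      unfold pvLab at hqlab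
      cases hrow : (PySem.Dict.mk pts.2).get? q with
      | none => rw [hrow] at hqlab; simp at hqlab
      | some row =>
        rw [hrow] at hqlab
        have hval : pvAVal data pts.1 q label = yes_label := by
          unfold pvAVal
          rw [hdata, pv_getD_some _ _ _ _ hrow, pv_getD_some _ _ _ _ hqlab]
        exact this hval
    · -- no positive in the window → A's guard true
      intro h y hy
      have hsome := hpre t ht hb y hy
      unfold pvLab at hsome
      cases hrow : (PySem.Dict.mk pts.2).get? (t + y) with
      | none => rw [hrow] at hsome; simp at hsome
      | some row =>
        rw [hrow] at hsome
        have hsome : ((PySem.Dict.mk row).get? label).isSome := hsome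
        cases hlab : (PySem.Dict.mk row).get? label with
        | none => rw [hlab] at hsome; simp at hsome
        | some v =>
          have hval : pvAVal data pts.1 (t + y) label = v := by
            unfold pvAVal
            rw [hdata, pv_getD_some _ _ _ _ hrow, pv_getD_some _ _ _ _ hlab]
          rw [hval]
          intro hveq
          -- then t+y is a positive timepoint inside the window
          have hqlab : pvLab pts.2 label (t + y) = some yes_label := by
            unfold pvLab
            rw [hrow]
            simp [hlab, hveq]
          have hqraw := (pv_mem_posRaw label yes_label pts.2 htnd (t + y)).mpr hqlab
          have hqpos : (t + y) ∈ pvPosB label yes_label pts.2 := by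
            unfold pvPosB
            exact (PySem.List.mem_sorted _ _ _ (t + y)).mpr hqraw
          have hyb := (PySem.List.mem_pyRange_one).mp hy
          exact h _ hqpos ⟨by omega, by omega⟩
  · simp [hb]

theorem pv_win_eq (data : List (Int × List (Int × List (String × String)))) (n : Int)
    (label : String) (pts : Int × List (Int × List (String × String)))
    (hdnd : (data.map (·.1)).Nodup) (hmem : pts ∈ data) (t : Int) :
    pvWinA data pts.1 n label t = pvWinB n label pts t := by
  have hdata : (PySem.Dict.mk data).getD pts.1 [] = pts.2 :=
    PySem.Dict.getD_of_mem_items (PySem.Dict.mk data) hmem (by simpa [PySem.Dict.keys] using hdnd) []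
  unfold pvWinA pvWinB pvAVal
  rw [hdata]

theorem pv_step_eq (data : List (Int × List (Int × List (String × String)))) (n : Int)
    (label yes_label : String) (pts : Int × List (Int × List (String × String)))
    (s : PySem.Dict Int (List (List (Int × String))))
    (hdnd : (data.map (·.1)).Nodup) (hmem : pts ∈ data)
    (htnd : (pts.2.map (·.1)).Nodup)
    (hpre : ∀ t ∈ pts.2.map (·.1),
      t < (pts.2.length : Int) - (n - 1) →
        (∀ y ∈ PySem.List.pyRange 0 (n - 1) 1, (pvLab pts.2 label (t + y)).isSome))
    (hs : s.contains pts.1 = false) :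
    pvStepA data n label yes_label s pts = pvStepB n label yes_label s pts := by
  unfold pvStepA
  have hcong : (PySem.Dict.mk pts.2).keys.foldl (fun snaps t =>
      if pvCondA data pts n label yes_label t then
        (if snaps.contains pts.1 then snaps else snaps.insert pts.1 []).modify pts.1 []
          (fun l => l ++ [pvWinA data pts.1 n label t])
      else snaps) s
    = (PySem.Dict.mk pts.2).keys.foldl (fun snaps t =>
      if pvCondB n label yes_label pts t then
        (if snaps.contains pts.1 then snaps else snaps.insert pts.1 []).modify pts.1 []
          (fun l => l ++ [pvWinA data pts.1 n label t])
      else snaps) s := by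
    apply PySem.List.foldl_congr_mem
    intro acc x hx
    have hx' : x ∈ pts.2.map (·.1) := by simpa [PySem.Dict.keys] using hx
    rw [pv_cond_eq data n label yes_label pts hdnd hmem htnd hpre x hx']
  rw [hcong, PySem.List.foldl_if_eq_foldl_filter, pv_foldA_fresh data n label pts.1 _ s hs]
  unfold pvStepB pvPatB
  have hmapeq : ((PySem.Dict.mk pts.2).keys.filter (pvCondB n label yes_label pts)).map (pvWinA data pts.1 n label)
      = ((PySem.Dict.mk pts.2).keys.filter (pvCondB n label yes_label pts)).map (pvWinB n label pts) := by
    apply List.map_congr_left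
    intro x _
    exact pv_win_eq data n label pts hdnd hmem x
  rw [hmapeq, List.isEmpty_map]

theorem pv_main (data : List (Int × List (Int × List (String × String)))) (n : Int)
    (label yes_label : String)
    (hdnd : (data.map (·.1)).Nodup)
    (hpre : ∀ pts ∈ data, (pts.2.map (·.1)).Nodup ∧
      ∀ t ∈ pts.2.map (·.1),
        t < (pts.2.length : Int) - (n - 1) →
          (∀ y ∈ PySem.List.pyRange 0 (n - 1) 1, (pvLab pts.2 label (t + y)).isSome)) :
    ∀ (l : List (Int × List (Int × List (String × String)))) (s : PySem.Dict Int (List (List (Int × String)))),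
      (∀ x ∈ l, x ∈ data) → (l.map (·.1)).Nodup → s.keys.Nodup →
      (∀ x ∈ l, s.contains x.1 = false) →
      l.foldl (pvStepA data n label yes_label) s = l.foldl (pvStepB n label yes_label) s := by
  intro l
  induction l with
  | nil => intro s _ _ _ _; rfl
  | cons pts tl ih =>
    intro s hsub hnd hknd hfresh
    have hptsmem : pts ∈ data := hsub pts (List.mem_cons_self ..)
    have hpts := hpre pts hptsmem
    have hndtl : (tl.map (·.1)).Nodup ∧ pts.1 ∉ tl.map (·.1) := by
      simp only [List.map_cons, List.nodup_cons] at hnd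
      exact ⟨hnd.2, hnd.1⟩
    simp only [List.foldl_cons]
    rw [pv_step_eq data n label yes_label pts s hdnd hptsmem hpts.1 hpts.2
      (hfresh pts (List.mem_cons_self ..))]
    apply ih _ (fun x hx => hsub x (List.mem_cons_of_mem _ hx)) hndtl.1
    · unfold pvStepB
      split
      · exact hknd
      · apply PySem.Dict.nodup_keys_insert
        exact hknd
    · intro x hx
      unfold pvStepB
      have hxne : x.1 ≠ pts.1 := by
        intro hcon
        exact hndtl.2 (hcon ▸ List.mem_map.mpr ⟨x, hx, rfl⟩)
      split
      · exact hfresh x (List.mem_cons_of_mem _ hx)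
      · rw [PySem.Dict.contains_insert]
        simp [hxne, hfresh x (List.mem_cons_of_mem _ hx)]

-- ===== VERDICT (by name: the statement is the Claim_ definition above) =====
theorem compute_consecutive_snapshots_n_spec : Claim_equal_compute_consecutive_snapshots_n := by
  intro data n label yes_label _hdom hpre
  obtain ⟨hdnd, hrest⟩ := hpre
  unfold Spec_compute_consecutive_snapshots_n
  show (List.foldl (pvStepA data n label yes_label) PySem.Dict.empty data).items
     = (List.foldl (pvStepB n label yes_label) PySem.Dict.empty data).items
  congr 1
  apply pv_main data n label yes_label hdnd
    (fun pts h => ⟨(hrest pts h).1, fun t ht hb => ((hrest pts h).2 t ht hb).1⟩)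
    data PySem.Dict.empty (fun x hx => hx) hdnd
  · simp [PySem.Dict.keys_empty]
  · intro x _; exact PySem.Dict.contains_empty ..
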